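-- pv_equiv track=rewrite | github.com/kelaplicativos-rgb/ia-planilhas | bling_app_zero/stable/stock_flash_crawler.py | _should_follow
-- ===== SOURCE A (Python) =====
-- def _should_follow(url: str) -> bool:
--     low = url.lower()
--     blocked = [
--         "/carrinho",
--         "/checkout",
--         "/login",
--         "/conta",
--         "/minha-conta",
--         "whatsapp",
--         "mailto:",
--         "tel:",
--         "javascript:",
--         "#",
--     ]
--     return not any(item in low for item in blocked)
-- ===== SOURCE B (Python) =====
-- _BLOCKED = [
--     "/carrinho",
--     "/checkout",
--     "/login",
--     "/conta",
--     "/minha-conta",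
--     "whatsapp",
--     "mailto:",
--     "tel:",
--     "javascript:",
--     "#",
-- ]
--
-- def _should_follow(url: str) -> bool:
--     # Single left-to-right pass over the lowercased URL, maintaining the set of
--     # partial matches (pattern, chars matched so far) that are still alive.
--     low = url.lower()
--     active = []  # list of (pattern, k): last k chars seen equal pattern[:k], 0 < k < len(pattern)
--     for ch in low:
--         nxt = []
--         for pat, k in active:
--             if pat[k] == ch:
--                 if k + 1 == len(pat):
--                     return False
--                 nxt.append((pat, k + 1))
--         for pat in _BLOCKED:
--             if pat[0] == ch:
--                 if len(pat) == 1: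
--                     return False
--                 nxt.append((pat, 1))
--         active = nxt
--     return True
-- ===== Notes on version B (the rewrite author's own statement) =====
-- stated objective: alternative
-- what changed: Replaces the k independent per-pattern substring searches by one left-to-right pass over the lowercased URL that maintains the set of live partial matches (pattern, matched-length) and reports blocked as soon as any pattern completes.
import Mathlib
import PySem

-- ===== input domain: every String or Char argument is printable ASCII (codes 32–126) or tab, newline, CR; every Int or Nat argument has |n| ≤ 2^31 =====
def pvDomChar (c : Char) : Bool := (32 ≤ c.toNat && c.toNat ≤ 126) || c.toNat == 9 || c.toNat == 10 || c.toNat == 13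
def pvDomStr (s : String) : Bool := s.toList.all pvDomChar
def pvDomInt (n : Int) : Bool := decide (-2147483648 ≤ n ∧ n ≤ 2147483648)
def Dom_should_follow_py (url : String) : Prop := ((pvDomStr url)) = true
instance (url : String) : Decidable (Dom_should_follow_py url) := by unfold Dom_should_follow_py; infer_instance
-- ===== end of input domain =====

-- B replaces the k independent substring searches by ONE left-to-right pass over the
-- lowercased URL maintaining the set of live partial matches (objective: alternative; same result).

-- ===== PORT A =====
def pvBlocked : List String :=
  ["/carrinho", "/checkout", "/login", "/conta", "/minha-conta",
   "whatsapp", "mailto:", "tel:", "javascript:", "#"]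

-- 'not any(item in low for item in blocked)'
def should_follow_py (url : String) : Bool :=
  let low := PySem.Str.lower url
  !(pvBlocked.any (fun item => PySem.Str.isIn item low))

-- ===== PORT B =====
-- Source B's _BLOCKED, as character lists
def pvBlockedPats : List (List Char) :=
  ["/carrinho".toList, "/checkout".toList, "/login".toList, "/conta".toList,
   "/minha-conta".toList, "whatsapp".toList, "mailto:".toList, "tel:".toList,
   "javascript:".toList, "#".toList]

-- inner loop 'for pat, k in active': none = Python's 'return False';
-- Python's pat[k] is ported as getD (by construction every live pair has k < len pat)
def pvStepActive (c : Char) : List (List Char × Nat) → Option (List (List Char × Nat))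
  | [] => some []
  | (p, k) :: rest =>
    if p.getD k ' ' == c then
      if k + 1 == p.length then none
      else (pvStepActive c rest).map (fun nxt => (p, k + 1) :: nxt)
    else pvStepActive c rest

-- inner loop 'for pat in _BLOCKED': fresh matches started at this character
def pvStepFresh (c : Char) : List (List Char) → Option (List (List Char × Nat))
  | [] => some []
  | p :: rest =>
    if p.getD 0 ' ' == c then
      if p.length == 1 then none
      else (pvStepFresh c rest).map (fun nxt => (p, 1) :: nxt)
    else pvStepFresh c rest

-- the 'for ch in low' loop; false = blocked substring found ('return False')
def pvScan (pats : List (List Char)) : List (List Char × Nat) → List Char → Bool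
  | _, [] => true
  | active, c :: t =>
    match pvStepActive c active with
    | none => false
    | some a1 =>
      match pvStepFresh c pats with
      | none => false
      | some a2 => pvScan pats (a1 ++ a2) t

def should_follow_py_alt (url : String) : Bool :=
  pvScan pvBlockedPats [] (PySem.Str.lower url).toList

-- ===== PRECONDITION & SPEC =====
def Spec_should_follow_py (url : String) (out : Bool) : Prop := out = should_follow_py_alt url
instance (url : String) (out : Bool) : Decidable (Spec_should_follow_py url out) := by unfold Spec_should_follow_py; infer_instance

-- ===== CLAIM (what is proved, stated in full; the proofs are below) =====
def Claim_equal_should_follow_py : Prop := ∀ (url : String), Dom_should_follow_py url → Spec_should_follow_py url (should_follow_py url)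

-- ===== LEMMAS AND PROOFS =====

theorem pvStepActive_none_iff (c : Char) (active : List (List Char × Nat))
    (h : ∀ pk ∈ active, pk.2 < pk.1.length) :
    pvStepActive c active = none ↔ ∃ pk ∈ active, pk.1.drop pk.2 = [c] := by
  induction active with
  | nil => simp [pvStepActive]
  | cons pk rest ih =>
    obtain ⟨p, k⟩ := pk
    have hk : k < p.length := h (p, k) (by simp)
    have ih' := ih (fun q hq => h q (List.mem_cons_of_mem _ hq))
    have hdrop : p.drop k = p[k] :: p.drop (k + 1) := List.drop_eq_getElem_cons hk
    have hgetD : p.getD k ' ' = p[k] := List.getD_eq_getElem p ' ' hk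
    simp only [pvStepActive, hgetD]
    by_cases hc : p[k] = c
    · by_cases hlen : k + 1 = p.length
      · simp only [hc, hlen, beq_self_eq_true, if_true, true_iff]
        refine ⟨(p, k), by simp, ?_⟩
        simp [hdrop, hc, List.drop_eq_nil_of_le (le_of_eq hlen.symm)]
      · have hne : (k + 1 == p.length) = false := by simp [hlen]
        simp only [hc, beq_self_eq_true, if_true, hne, Bool.false_eq_true, if_false,
          Option.map_eq_none_iff, ih']
        constructor
        · rintro ⟨q, hq, hdq⟩; exact ⟨q, List.mem_cons_of_mem _ hq, hdq⟩
        · rintro ⟨q, hq, hdq⟩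
          rcases List.mem_cons.mp hq with rfl | hq'
          · exfalso
            rw [hdrop] at hdq
            have h2 := (List.cons_eq_cons.mp hdq).2
            have := List.drop_eq_nil_iff.mp h2
            omega
          · exact ⟨q, hq', hdq⟩
    · have hcb : (p[k] == c) = false := by simp [hc]
      simp only [hcb, Bool.false_eq_true, if_false, ih']
      constructor
      · rintro ⟨q, hq, hdq⟩; exact ⟨q, List.mem_cons_of_mem _ hq, hdq⟩
      · rintro ⟨q, hq, hdq⟩
        rcases List.mem_cons.mp hq with rfl | hq'
        · exfalso; rw [hdrop] at hdq
          have := (List.cons_eq_cons.mp hdq).1; exact hc this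
        · exact ⟨q, hq', hdq⟩

theorem pvStepActive_some_iff (c : Char) (active : List (List Char × Nat))
    (h : ∀ pk ∈ active, pk.2 < pk.1.length) (a1 : List (List Char × Nat))
    (hs : pvStepActive c active = some a1) (q : List Char × Nat) :
    q ∈ a1 ↔ ∃ pk ∈ active, pk.1[pk.2]? = some c ∧ pk.2 + 1 ≠ pk.1.length ∧ q = (pk.1, pk.2 + 1) := by
  induction active generalizing a1 with
  | nil => simp [pvStepActive] at hs; subst hs; simp
  | cons pk rest ih =>
    obtain ⟨p, k⟩ := pk
    have hk : k < p.length := h (p, k) (by simp)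
    have hgetD : p.getD k ' ' = p[k] := List.getD_eq_getElem p ' ' hk
    have hget? : p[k]? = some p[k] := List.getElem?_eq_getElem hk
    simp only [pvStepActive, hgetD] at hs
    by_cases hc : p[k] = c
    · by_cases hlen : k + 1 = p.length
      · simp [hc, hlen] at hs
      · have hne : (k + 1 == p.length) = false := by simp [hlen]
        simp only [hc, beq_self_eq_true, if_true, hne, Bool.false_eq_true, if_false] at hs
        rcases Option.map_eq_some_iff.mp hs with ⟨nxt, hnxt, rfl⟩
        have ih' := ih (fun r hr => h r (List.mem_cons_of_mem _ hr)) nxt hnxt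
        simp only [List.mem_cons, ih']
        constructor
        · rintro (rfl | ⟨r, hr, h1, h2, rfl⟩)
          · exact ⟨(p, k), Or.inl rfl, by rw [hget?, hc], hlen, rfl⟩
          · exact ⟨r, Or.inr hr, h1, h2, rfl⟩
        · rintro ⟨r, hr, h1, h2, rfl⟩
          rcases hr with rfl | hr'
          · exact Or.inl rfl
          · exact Or.inr ⟨r, hr', h1, h2, rfl⟩
    · have hcb : (p[k] == c) = false := by simp [hc]
      simp only [hcb, Bool.false_eq_true, if_false] at hs
      have ih' := ih (fun r hr => h r (List.mem_cons_of_mem _ hr)) a1 hs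
      rw [ih']
      constructor
      · rintro ⟨r, hr, h1, h2, rfl⟩; exact ⟨r, List.mem_cons_of_mem _ hr, h1, h2, rfl⟩
      · rintro ⟨r, hr, h1, h2, rfl⟩
        rcases List.mem_cons.mp hr with rfl | hr'
        · exfalso; rw [hget?] at h1; exact hc (Option.some_injective _ h1)
        · exact ⟨r, hr', h1, h2, rfl⟩

theorem pvStepFresh_none_iff (c : Char) (pats : List (List Char))
    (h : ∀ p ∈ pats, p ≠ []) :
    pvStepFresh c pats = none ↔ ∃ p ∈ pats, p = [c] := by
  induction pats with
  | nil => simp [pvStepFresh]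
  | cons p rest ih =>
    have hp : p ≠ [] := h p (by simp)
    have hk : 0 < p.length := List.length_pos_iff.mpr hp
    have hgetD : p.getD 0 ' ' = p[0] := List.getD_eq_getElem p ' ' hk
    have ih' := ih (fun q hq => h q (List.mem_cons_of_mem _ hq))
    have hdrop : p = p[0] :: p.drop 1 := by
      simpa using List.drop_eq_getElem_cons hk
    simp only [pvStepFresh, hgetD]
    by_cases hc : p[0] = c
    · by_cases hlen : p.length = 1
      · simp only [hc, hlen, beq_self_eq_true, if_true, true_iff]
        refine ⟨p, by simp, ?_⟩
        rw [hdrop, hc, List.drop_eq_nil_of_le (le_of_eq hlen)]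
      · have hne : (p.length == 1) = false := by simp [hlen]
        simp only [hc, beq_self_eq_true, if_true, hne, Bool.false_eq_true, if_false,
          Option.map_eq_none_iff, ih']
        constructor
        · rintro ⟨q, hq, hdq⟩; exact ⟨q, List.mem_cons_of_mem _ hq, hdq⟩
        · rintro ⟨q, hq, hdq⟩
          rcases List.mem_cons.mp hq with rfl | hq'
          · exact absurd (by rw [hdq]; rfl) hlen
          · exact ⟨q, hq', hdq⟩
    · have hcb : (p[0] == c) = false := by simp [hc]
      simp only [hcb, Bool.false_eq_true, if_false, ih']
      constructor
      · rintro ⟨q, hq, hdq⟩; exact ⟨q, List.mem_cons_of_mem _ hq, hdq⟩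
      · rintro ⟨q, hq, hdq⟩
        rcases List.mem_cons.mp hq with rfl | hq'
        · exfalso; subst hdq; simp at hc
        · exact ⟨q, hq', hdq⟩

theorem pvStepFresh_some_iff (c : Char) (pats : List (List Char))
    (h : ∀ p ∈ pats, p ≠ []) (a2 : List (List Char × Nat))
    (hs : pvStepFresh c pats = some a2) (q : List Char × Nat) :
    q ∈ a2 ↔ ∃ p ∈ pats, p[0]? = some c ∧ p.length ≠ 1 ∧ q = (p, 1) := by
  induction pats generalizing a2 with
  | nil => simp [pvStepFresh] at hs; subst hs; simp
  | cons p rest ih =>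
    have hp : p ≠ [] := h p (by simp)
    have hk : 0 < p.length := List.length_pos_iff.mpr hp
    have hgetD : p.getD 0 ' ' = p[0] := List.getD_eq_getElem p ' ' hk
    have hget? : p[0]? = some p[0] := List.getElem?_eq_getElem hk
    simp only [pvStepFresh, hgetD] at hs
    by_cases hc : p[0] = c
    · by_cases hlen : p.length = 1
      · simp [hc, hlen] at hs
      · have hne : (p.length == 1) = false := by simp [hlen]
        simp only [hc, beq_self_eq_true, if_true, hne, Bool.false_eq_true, if_false] at hs
        rcases Option.map_eq_some_iff.mp hs with ⟨nxt, hnxt, rfl⟩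
        have ih' := ih (fun r hr => h r (List.mem_cons_of_mem _ hr)) nxt hnxt
        simp only [List.mem_cons, ih']
        constructor
        · rintro (rfl | ⟨r, hr, h1, h2, rfl⟩)
          · exact ⟨p, Or.inl rfl, by rw [hget?, hc], hlen, rfl⟩
          · exact ⟨r, Or.inr hr, h1, h2, rfl⟩
        · rintro ⟨r, hr, h1, h2, rfl⟩
          rcases hr with rfl | hr'
          · exact Or.inl rfl
          · exact Or.inr ⟨r, hr', h1, h2, rfl⟩
    · have hcb : (p[0] == c) = false := by simp [hc]
      simp only [hcb, Bool.false_eq_true, if_false] at hs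
      have ih' := ih (fun r hr => h r (List.mem_cons_of_mem _ hr)) a2 hs
      rw [ih']
      constructor
      · rintro ⟨r, hr, h1, h2, rfl⟩; exact ⟨r, List.mem_cons_of_mem _ hr, h1, h2, rfl⟩
      · rintro ⟨r, hr, h1, h2, rfl⟩
        rcases List.mem_cons.mp hr with rfl | hr'
        · exfalso; rw [hget?] at h1; exact hc (Option.some_injective _ h1)
        · exact ⟨r, hr', h1, h2, rfl⟩

-- the scan returns false iff a live partial match completes or some pattern occurs as an infix
theorem pvScan_false_iff (pats : List (List Char)) (hpats : ∀ p ∈ pats, p ≠ [])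
    (s : List Char) : ∀ active, (∀ pk ∈ active, pk.2 < pk.1.length) →
    (pvScan pats active s = false ↔
      (∃ pk ∈ active, pk.1.drop pk.2 <+: s) ∨ ∃ p ∈ pats, p <:+: s) := by
  induction s with
  | nil =>
    intro active h
    simp only [pvScan, Bool.true_eq_false, false_iff]
    push Not
    constructor
    · rintro ⟨p, k⟩ hpk
      have hk : k < p.length := h (p, k) hpk
      intro hpre
      have : p.drop k = [] := List.prefix_nil.mp hpre
      have := List.drop_eq_nil_iff.mp this
      omega
    · intro p hp hinf
      exact hpats p hp (List.eq_nil_of_infix_nil hinf)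
  | cons c t ih =>
    intro active h
    simp only [pvScan]
    rcases hA : pvStepActive c active with _ | a1
    · simp only [true_iff]
      rcases (pvStepActive_none_iff c active h).mp hA with ⟨pk, hpk, hdq⟩
      exact Or.inl ⟨pk, hpk, by rw [hdq]; simp⟩
    · rcases hF : pvStepFresh c pats with _ | a2
      · simp only [true_iff]
        rcases (pvStepFresh_none_iff c pats hpats).mp hF with ⟨p, hp, hpc⟩
        exact Or.inr ⟨p, hp, by rw [hpc]; exact (List.prefix_cons_iff.mpr (Or.inr (by simp))).isInfix⟩
      · -- the new active set is well-formed
        have hwf : ∀ pk ∈ a1 ++ a2, pk.2 < pk.1.length := by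
          intro q hq
          rcases List.mem_append.mp hq with hq1 | hq2
          · rcases (pvStepActive_some_iff c active h a1 hA q).mp hq1 with ⟨r, hr, h1, h2, rfl⟩
            have := h r hr
            simp only []
            omega
          · rcases (pvStepFresh_some_iff c pats hpats a2 hF q).mp hq2 with ⟨p, hp, h1, h2, rfl⟩
            have : 0 < p.length := List.length_pos_iff.mpr (hpats p hp)
            simp only []
            omega
        rw [ih _ hwf]
        constructor
        · rintro (⟨q, hq, hpre⟩ | ⟨p, hp, hinf⟩)
          · rcases List.mem_append.mp hq with hq1 | hq2
            · rcases (pvStepActive_some_iff c active h a1 hA q).mp hq1 with ⟨⟨p, k⟩, hr, h1, h2, rfl⟩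
              refine Or.inl ⟨(p, k), hr, ?_⟩
              have hk : k < p.length := h (p, k) hr
              have hdrop : p.drop k = p[k] :: p.drop (k + 1) := List.drop_eq_getElem_cons hk
              have hc : p[k] = c := by
                have := List.getElem?_eq_getElem hk
                rw [this] at h1; exact Option.some_injective _ h1
              rw [hdrop, hc]
              exact List.cons_prefix_cons.mpr ⟨rfl, hpre⟩
            · rcases (pvStepFresh_some_iff c pats hpats a2 hF q).mp hq2 with ⟨p, hp, h1, h2, rfl⟩
              refine Or.inr ⟨p, hp, ?_⟩
              have hk : 0 < p.length := List.length_pos_iff.mpr (hpats p hp)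
              have hdrop : p = p[0] :: p.drop 1 := by
                simpa using List.drop_eq_getElem_cons hk
              have hc : p[0] = c := by
                have := List.getElem?_eq_getElem hk
                rw [this] at h1; exact Option.some_injective _ h1
              refine List.IsPrefix.isInfix ?_
              rw [hdrop, hc]
              exact List.cons_prefix_cons.mpr ⟨rfl, hpre⟩
          · exact Or.inr ⟨p, hp, hinf.trans (List.suffix_cons c t).isInfix⟩
        · rintro (⟨⟨p, k⟩, hpk, hpre⟩ | ⟨p, hp, hinf⟩)
          · -- an old partial either completes (contradiction with hA) or survives into a1
            have hk : k < p.length := h (p, k) hpk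
            have hdrop : p.drop k = p[k] :: p.drop (k + 1) := List.drop_eq_getElem_cons hk
            rw [hdrop] at hpre
            rcases List.cons_prefix_cons.mp hpre with ⟨hc, hpre'⟩
            by_cases hlen : k + 1 = p.length
            · exfalso
              have : pvStepActive c active = none := by
                rw [pvStepActive_none_iff c active h]
                refine ⟨(p, k), hpk, ?_⟩
                rw [hdrop, hc]
                simp [List.drop_eq_nil_of_le (le_of_eq hlen.symm)]
              rw [this] at hA; simp at hA
            · refine Or.inl ⟨(p, k + 1), ?_, hpre'⟩
              refine List.mem_append.mpr (Or.inl ?_)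
              rw [pvStepActive_some_iff c active h a1 hA]
              exact ⟨(p, k), hpk, by rw [List.getElem?_eq_getElem hk, hc], hlen, rfl⟩
          · rcases List.infix_cons_iff.mp hinf with hpre | hinf'
            · -- pattern starts here: either it is [c] (contradiction with hF) or (p,1) enters a2
              have hk : 0 < p.length := List.length_pos_iff.mpr (hpats p hp)
              have hdrop : p = p[0] :: p.drop 1 := by
                simpa using List.drop_eq_getElem_cons hk
              rw [hdrop] at hpre
              rcases List.cons_prefix_cons.mp hpre with ⟨hc, hpre'⟩
              by_cases hlen : p.length = 1
              · exfalso
                have : pvStepFresh c pats = none := by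
                  rw [pvStepFresh_none_iff c pats hpats]
                  refine ⟨p, hp, ?_⟩
                  rw [hdrop, hc]
                  simp [List.drop_eq_nil_of_le (le_of_eq hlen)]
                rw [this] at hF; simp at hF
              · refine Or.inl ⟨(p, 1), ?_, hpre'⟩
                refine List.mem_append.mpr (Or.inr ?_)
                rw [pvStepFresh_some_iff c pats hpats a2 hF]
                exact ⟨p, hp, by rw [List.getElem?_eq_getElem hk, hc], hlen, rfl⟩
            · exact Or.inr ⟨p, hp, hinf'⟩

theorem pvPats_map : pvBlockedPats = pvBlocked.map String.toList := by decide

theorem pvPats_nonempty : ∀ p ∈ pvBlockedPats, p ≠ [] := by decide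

-- ===== VERDICT (by name: the statement is the Claim_ definition above) =====
theorem should_follow_py_spec : Claim_equal_should_follow_py := by
  intro url _
  suffices h : ∀ low : List Char,
      (!(pvBlocked.any fun item => PySem.Chars.isIn item.toList low))
        = pvScan pvBlockedPats [] low by
    simp only [Spec_should_follow_py, should_follow_py, should_follow_py_alt,
      PySem.Str.lower, PySem.Str.isIn]
    exact h _
  intro low
  have hiff := pvScan_false_iff pvBlockedPats pvPats_nonempty low [] (by simp)
  simp only [List.not_mem_nil] at hiff
  rcases hs : pvScan pvBlockedPats [] low with _ | _
  · rw [Bool.not_eq_eq_eq_not, Bool.not_false]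
    rw [List.any_eq_true]
    rcases (hiff.mp hs) with ⟨pk, hpk, _⟩ | ⟨p, hp, hinf⟩
    · simp at hpk
    · rw [pvPats_map] at hp
      rcases List.mem_map.mp hp with ⟨item, hitem, rfl⟩
      exact ⟨item, hitem, (PySem.Chars.isIn_iff_infix _ _).mpr hinf⟩
  · rw [Bool.not_eq_eq_eq_not, Bool.not_true]
    rw [List.any_eq_false]
    intro item hitem hin
    have hinf := (PySem.Chars.isIn_iff_infix _ _).mp hin
    have : pvScan pvBlockedPats [] low = false := by
      apply hiff.mpr
      refine Or.inr ⟨item.toList, ?_, hinf⟩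
      rw [pvPats_map]; exact List.mem_map_of_mem hitem
    rw [hs] at this; exact Bool.noConfusion this
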